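-- pv_equiv track=rewrite | github.com/abimmost/Deepseeds-Project-v-abimmost | 2.0 software 1.0/python intermediate/Day2/DS/sets.py | find_unique_words
-- ===== SOURCE A (Python) =====
-- def find_unique_words(text1, text2):
--     words1 = set(text1.lower().split())
--     words2 = set(text2.lower().split())
--     words1 = {word.strip(".,!?;:") for word in words1}
--     words2 = {word.strip(".,!?;:") for word in words2}
--
--     common_words = words1 & words2
--     unique_to_text1 = words1 - words2
--     unique_to_text2 = words2 - words1
--
--     return {
--         "common": common_words,
--         "unique_to_first": unique_to_text1,
--         "unique_to_second": unique_to_text2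
--     }
-- ===== SOURCE B (Python) =====
-- def find_unique_words(text1, text2):
--     # One streaming pass per text builds a word -> presence-bitmask dictionary
--     # (bit 1 = occurs in text1, bit 2 = occurs in text2); no set objects and no
--     # set-membership tests are used.  A final pass buckets each word by its mask.
--     mask = {}
--     for w in text1.lower().split():
--         w = w.strip(".,!?;:")
--         mask[w] = mask.get(w, 0) | 1
--     for w in text2.lower().split():
--         w = w.strip(".,!?;:")
--         mask[w] = mask.get(w, 0) | 2
--     common, unique_to_first, unique_to_second = set(), set(), set()
--     for w, m in mask.items():
--         if m == 3:
--             common.add(w)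
--         elif m == 1:
--             unique_to_first.add(w)
--         else:
--             unique_to_second.add(w)
--     return {"common": common,
--             "unique_to_first": unique_to_first,
--             "unique_to_second": unique_to_second}
-- ===== Notes on version B (the rewrite author's own statement) =====
-- stated objective: alternative
-- what changed: Replaces A's set algebra (build two word sets, then &, -, -) with a single word->bitmask dictionary built by streaming over both texts' word occurrences (bit 1 = in text1, bit 2 = in text2), and one bucketing pass over the dictionary that reads the mask value; no sets or membership tests are built until the output.
import Mathlib
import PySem

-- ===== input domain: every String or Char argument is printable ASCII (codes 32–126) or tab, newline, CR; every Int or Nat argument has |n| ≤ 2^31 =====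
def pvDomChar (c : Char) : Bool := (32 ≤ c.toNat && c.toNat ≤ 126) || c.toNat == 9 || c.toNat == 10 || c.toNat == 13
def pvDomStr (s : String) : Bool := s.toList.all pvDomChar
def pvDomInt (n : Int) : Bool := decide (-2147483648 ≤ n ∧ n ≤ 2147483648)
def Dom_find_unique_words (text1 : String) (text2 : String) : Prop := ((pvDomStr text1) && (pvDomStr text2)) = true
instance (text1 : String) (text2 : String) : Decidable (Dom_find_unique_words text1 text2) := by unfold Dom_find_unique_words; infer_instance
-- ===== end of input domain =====

-- B replaces A's set algebra (two word sets, then &, -, -) with a single word→bitmask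
-- dictionary streamed over both texts' word occurrences, bucketed by mask value;
-- an alternative algorithm of the same cost.

-- ===== PORT A =====
def find_unique_words (text1 : String) (text2 : String) : List (String × List String) :=
  let words1 : PySem.Set String := PySem.Set.ofList (PySem.Str.split₀ (PySem.Str.lower text1))
  let words2 : PySem.Set String := PySem.Set.ofList (PySem.Str.split₀ (PySem.Str.lower text2))
  let words1 : PySem.Set String := PySem.Set.ofList (words1.map (fun word => PySem.Str.stripChars word ".,!?;:"))
  let words2 : PySem.Set String := PySem.Set.ofList (words2.map (fun word => PySem.Str.stripChars word ".,!?;:"))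
  let common_words := PySem.Set.inter words1 words2
  let unique_to_text1 := PySem.Set.diff words1 words2
  let unique_to_text2 := PySem.Set.diff words2 words1
  [("common", common_words), ("unique_to_first", unique_to_text1), ("unique_to_second", unique_to_text2)]

-- ===== PORT B =====
-- B-side helper: 'mask[w] = mask.get(w, 0) | c' for an already-stripped word w
def pvStep (c : Int) (d : PySem.Dict String Int) (w : String) : PySem.Dict String Int :=
  d.insert w (PySem.Int.bor (d.getD w 0) c)

-- B-side helper: the body of each marking loop ('w = w.strip(".,!?;:"); mask[w] = mask.get(w, 0) | c')
def pvMark (c : Int) (d : PySem.Dict String Int) (w0 : String) : PySem.Dict String Int :=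
  pvStep c d (PySem.Str.stripChars w0 ".,!?;:")

-- B-side helper: the body of the bucketing loop over mask.items()
def pvBucket (acc : List String × List String × List String) (p : String × Int) :
    List String × List String × List String :=
  if p.2 == 3 then (PySem.Set.add acc.1 p.1, acc.2.1, acc.2.2)
  else if p.2 == 1 then (acc.1, PySem.Set.add acc.2.1 p.1, acc.2.2)
  else (acc.1, acc.2.1, PySem.Set.add acc.2.2 p.1)

def find_unique_words_alt (text1 : String) (text2 : String) : List (String × List String) :=
  let mask1 := (PySem.Str.split₀ (PySem.Str.lower text1)).foldl (pvMark 1) PySem.Dict.empty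
  let mask := (PySem.Str.split₀ (PySem.Str.lower text2)).foldl (pvMark 2) mask1
  let acc := mask.items.foldl pvBucket (PySem.Set.empty, PySem.Set.empty, PySem.Set.empty)
  [("common", acc.1), ("unique_to_first", acc.2.1), ("unique_to_second", acc.2.2)]

-- ===== PRECONDITION & SPEC =====
def Spec_find_unique_words (text1 : String) (text2 : String) (out : List (String × List String)) : Prop := out = find_unique_words_alt text1 text2
instance (text1 : String) (text2 : String) (out : List (String × List String)) : Decidable (Spec_find_unique_words text1 text2 out) := by unfold Spec_find_unique_words; infer_instance

-- ===== CLAIM (what is proved, stated in full; the proofs are below) =====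
def Claim_equal_find_unique_words : Prop := ∀ (text1 : String) (text2 : String), Dom_find_unique_words text1 text2 → Spec_find_unique_words text1 text2 (find_unique_words text1 text2)

-- ===== LEMMAS AND PROOFS =====

-- masks are always one of 0,1,2,3, and |c is idempotent on them (c ∈ {1,2})
theorem pvBor_small (c x : Int) (hc : c = 1 ∨ c = 2) (hx : x = 0 ∨ x = 1 ∨ x = 2 ∨ x = 3) :
    (PySem.Int.bor x c = 0 ∨ PySem.Int.bor x c = 1 ∨ PySem.Int.bor x c = 2 ∨ PySem.Int.bor x c = 3)
      ∧ PySem.Int.bor (PySem.Int.bor x c) c = PySem.Int.bor x c := by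
  rcases hc with rfl | rfl <;> rcases hx with rfl | rfl | rfl | rfl <;> exact ⟨by decide, by decide⟩

def pvSmall (d : PySem.Dict String Int) : Prop :=
  ∀ k, d.getD k 0 = 0 ∨ d.getD k 0 = 1 ∨ d.getD k 0 = 2 ∨ d.getD k 0 = 3

-- the marking fold ORs c into exactly the masks of the words it sees
theorem pvStep_foldl_getD (c : Int) (hc : c = 1 ∨ c = 2) :
    ∀ (l : List String) (d : PySem.Dict String Int), pvSmall d → ∀ k,
      (l.foldl (pvStep c) d).getD k 0 =
        if k ∈ l then PySem.Int.bor (d.getD k 0) c else d.getD k 0 := by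
  intro l
  induction l with
  | nil => intro d _ k; simp
  | cons w l ih =>
    intro d hd k
    have hd' : pvSmall (pvStep c d w) := by
      intro j
      by_cases hj : j = w
      · subst hj
        simp only [pvStep, PySem.Dict.getD_insert_self]
        exact (pvBor_small c _ hc (hd j)).1
      · simpa [pvStep, PySem.Dict.getD_insert, hj] using hd j
    have hstep : (pvStep c d w).getD k 0 =
        if k = w then PySem.Int.bor (d.getD w 0) c else d.getD k 0 := by
      simp [pvStep, PySem.Dict.getD_insert]
    rw [List.foldl_cons, ih _ hd' k, hstep]
    by_cases hkw : k = w
    · subst hkw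
      by_cases hkl : k ∈ l
      · simpa [hkl] using (pvBor_small c _ hc (hd k)).2
      · simp [hkl]
    · by_cases hkl : k ∈ l <;> simp [hkw, hkl]
  
-- the bucketing fold appends, per bucket, the keys whose mask selects it
theorem pvBucket_foldl (items : List (String × Int)) :
    ∀ (c a b : List String), (items.map Prod.fst).Nodup →
      (∀ p ∈ items, p.1 ∉ c) → (∀ p ∈ items, p.1 ∉ a) → (∀ p ∈ items, p.1 ∉ b) →
      items.foldl pvBucket (c, a, b) =
        (c ++ (items.filter (fun p => p.2 == 3)).map Prod.fst,
         a ++ (items.filter (fun p => p.2 == 1)).map Prod.fst,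
         b ++ (items.filter (fun p => p.2 != 3 && p.2 != 1)).map Prod.fst) := by
  induction items with
  | nil => intro c a b _ _ _ _; simp
  | cons p items ih =>
    intro c a b hnd hc ha hb
    have hnd0 := List.nodup_cons.mp (by simpa using hnd : (p.1 :: items.map Prod.fst).Nodup)
    obtain ⟨hp, hnd'⟩ := hnd0
    have hne : ∀ q ∈ items, q.1 ≠ p.1 := by
      intro q hq h
      exact hp (h ▸ List.mem_map_of_mem hq)
    have hc' : ∀ q ∈ items, q.1 ∉ c := fun q hq => hc q (by simp [hq])
    have ha' : ∀ q ∈ items, q.1 ∉ a := fun q hq => ha q (by simp [hq])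
    have hb' : ∀ q ∈ items, q.1 ∉ b := fun q hq => hb q (by simp [hq])
    have hpc : p.1 ∉ c := hc p (by simp)
    have hpa : p.1 ∉ a := ha p (by simp)
    have hpb : p.1 ∉ b := hb p (by simp)
    simp only [List.foldl_cons]
    by_cases h3 : p.2 = 3
    · have hstep : pvBucket (c, a, b) p = (c ++ [p.1], a, b) := by
        simp [pvBucket, h3, PySem.Set.add_of_not_mem hpc]
      rw [hstep, ih (c ++ [p.1]) a b hnd'
        (fun q hq => by simp [hc' q hq, hne q hq]) ha' hb']
      simp [h3, List.append_assoc]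
    · by_cases h1 : p.2 = 1
      · have hstep : pvBucket (c, a, b) p = (c, a ++ [p.1], b) := by
          simp [pvBucket, h1, PySem.Set.add_of_not_mem hpa]
        rw [hstep, ih c (a ++ [p.1]) b hnd' hc'
          (fun q hq => by simp [ha' q hq, hne q hq]) hb']
        simp [h1, List.append_assoc]
      · have hstep : pvBucket (c, a, b) p = (c, a, b ++ [p.1]) := by
          simp [pvBucket, h3, h1, PySem.Set.add_of_not_mem hpb]
        rw [hstep, ih c a (b ++ [p.1]) hnd' hc' ha'
          (fun q hq => by simp [hb' q hq, hne q hq])]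
        simp [h3, h1, List.append_assoc]

-- dedup-then-strip-then-dedup is strip-then-dedup
theorem pvOfList_map (f : String → String) (l : List String) :
    PySem.Set.ofList ((PySem.Set.ofList l).map f) = PySem.Set.ofList (l.map f) := by
  induction l using List.reverseRecOn with
  | nil => rfl
  | append_singleton l x ih =>
    rw [PySem.Set.ofList_append_singleton]
    by_cases hx : x ∈ l
    · have h1 : PySem.Set.add (PySem.Set.ofList l) x = PySem.Set.ofList l :=
        PySem.Set.add_of_mem (by simpa [PySem.Set.mem_ofList] using hx)
      have h2 : PySem.Set.ofList (l.map f ++ [f x]) = PySem.Set.ofList (l.map f) := by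
        rw [PySem.Set.ofList_append_singleton]
        exact PySem.Set.add_of_mem (by
          simp only [PySem.Set.mem_ofList]
          exact List.mem_map_of_mem hx)
      rw [h1, ih, List.map_append]
      simpa using h2.symm
    · have h1 : PySem.Set.add (PySem.Set.ofList l) x = PySem.Set.ofList l ++ [x] :=
        PySem.Set.add_of_not_mem (by simpa [PySem.Set.mem_ofList] using hx)
      rw [h1, List.map_append, List.map_singleton, PySem.Set.ofList_append_singleton, ih,
        List.map_append, List.map_singleton, PySem.Set.ofList_append_singleton]

-- A's result, expressed through the stripped word lists
theorem pvA_eq (text1 text2 : String) :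
    find_unique_words text1 text2 =
      [("common", PySem.Set.inter
          (PySem.Set.ofList ((PySem.Str.split₀ (PySem.Str.lower text1)).map (fun w => PySem.Str.stripChars w ".,!?;:")))
          (PySem.Set.ofList ((PySem.Str.split₀ (PySem.Str.lower text2)).map (fun w => PySem.Str.stripChars w ".,!?;:")))),
       ("unique_to_first", PySem.Set.diff
          (PySem.Set.ofList ((PySem.Str.split₀ (PySem.Str.lower text1)).map (fun w => PySem.Str.stripChars w ".,!?;:")))
          (PySem.Set.ofList ((PySem.Str.split₀ (PySem.Str.lower text2)).map (fun w => PySem.Str.stripChars w ".,!?;:")))),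
       ("unique_to_second", PySem.Set.diff
          (PySem.Set.ofList ((PySem.Str.split₀ (PySem.Str.lower text2)).map (fun w => PySem.Str.stripChars w ".,!?;:")))
          (PySem.Set.ofList ((PySem.Str.split₀ (PySem.Str.lower text1)).map (fun w => PySem.Str.stripChars w ".,!?;:"))))] := by
  unfold find_unique_words
  dsimp only
  rw [pvOfList_map, pvOfList_map]

-- B's result, expressed the same way
set_option maxHeartbeats 1600000 in
theorem pvB_eq (text1 text2 : String) :
    find_unique_words_alt text1 text2 =
      [("common", PySem.Set.inter
          (PySem.Set.ofList ((PySem.Str.split₀ (PySem.Str.lower text1)).map (fun w => PySem.Str.stripChars w ".,!?;:")))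
          (PySem.Set.ofList ((PySem.Str.split₀ (PySem.Str.lower text2)).map (fun w => PySem.Str.stripChars w ".,!?;:")))),
       ("unique_to_first", PySem.Set.diff
          (PySem.Set.ofList ((PySem.Str.split₀ (PySem.Str.lower text1)).map (fun w => PySem.Str.stripChars w ".,!?;:")))
          (PySem.Set.ofList ((PySem.Str.split₀ (PySem.Str.lower text2)).map (fun w => PySem.Str.stripChars w ".,!?;:")))),
       ("unique_to_second", PySem.Set.diff
          (PySem.Set.ofList ((PySem.Str.split₀ (PySem.Str.lower text2)).map (fun w => PySem.Str.stripChars w ".,!?;:")))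
          (PySem.Set.ofList ((PySem.Str.split₀ (PySem.Str.lower text1)).map (fun w => PySem.Str.stripChars w ".,!?;:"))))] := by
  unfold find_unique_words_alt
  -- abbreviations
  set f : String → String := (fun w => PySem.Str.stripChars w ".,!?;:") with hf
  set l1 : List String := (PySem.Str.split₀ (PySem.Str.lower text1)).map f with hl1
  set l2 : List String := (PySem.Str.split₀ (PySem.Str.lower text2)).map f with hl2
  set S1 : PySem.Set String := PySem.Set.ofList l1 with hS1
  set S2 : PySem.Set String := PySem.Set.ofList l2 with hS2
  -- the marking loops fold pvStep over the stripped word lists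
  have hm1 : (PySem.Str.split₀ (PySem.Str.lower text1)).foldl (pvMark 1) PySem.Dict.empty
      = l1.foldl (pvStep 1) PySem.Dict.empty := by
    rw [hl1, List.foldl_map]; rfl
  have hm2 : ∀ d, (PySem.Str.split₀ (PySem.Str.lower text2)).foldl (pvMark 2) d
      = l2.foldl (pvStep 2) d := by
    intro d; rw [hl2, List.foldl_map]; rfl
  dsimp only
  rw [hm1, hm2]
  set M1 : PySem.Dict String Int := l1.foldl (pvStep 1) PySem.Dict.empty with hM1
  set M : PySem.Dict String Int := l2.foldl (pvStep 2) M1 with hM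
  -- mask values
  have hemp : pvSmall PySem.Dict.empty := by intro k; simp [PySem.Dict.getD_empty]
  have g1 : ∀ k, M1.getD k 0 = if k ∈ l1 then 1 else 0 := by
    intro k
    rw [hM1, pvStep_foldl_getD 1 (Or.inl rfl) l1 _ hemp k]
    by_cases h : k ∈ l1 <;> · simp [h, PySem.Dict.getD_empty]; try decide
  have small1 : pvSmall M1 := by
    intro k; rw [g1 k]; by_cases h : k ∈ l1 <;> simp [h]
  have gv : ∀ k, M.getD k 0 =
      if k ∈ l1 then (if k ∈ l2 then (3:Int) else 1) else (if k ∈ l2 then 2 else 0) := by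
    intro k
    rw [hM, pvStep_foldl_getD 2 (Or.inr rfl) l2 _ small1 k, g1 k]
    by_cases h1 : k ∈ l1 <;> by_cases h2 : k ∈ l2 <;> simp [h1, h2] <;> decide
  -- keys
  have hk1 : M1.keys = S1 := by
    rw [hM1, show pvStep 1 = (fun (d : PySem.Dict String Int) (x : String) =>
        d.insert x (PySem.Int.bor (d.getD x 0) 1)) from rfl,
      PySem.Dict.keys_foldl_insert l1 (fun d x => PySem.Int.bor (d.getD x 0) 1) PySem.Dict.empty]
    simp [PySem.Set.update_nil_left, ← hS1]
  have hkeys : M.keys = S1 ++ S2.filter (fun y => !(PySem.Set.contains S1 y)) := by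
    rw [hM, show pvStep 2 = (fun (d : PySem.Dict String Int) (x : String) =>
        d.insert x (PySem.Int.bor (d.getD x 0) 2)) from rfl,
      PySem.Dict.keys_foldl_insert l2 (fun d x => PySem.Int.bor (d.getD x 0) 2) M1, hk1,
      PySem.Set.update_eq_append_filter]
  have hnodup : M.keys.Nodup := by
    rw [hM, show pvStep 2 = (fun (d : PySem.Dict String Int) (x : String) =>
        d.insert x (PySem.Int.bor (d.getD x 0) 2)) from rfl]
    exact PySem.Dict.nodup_keys_foldl_insert l2 _ M1 (by
      rw [hM1, show pvStep 1 = (fun (d : PySem.Dict String Int) (x : String) =>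
          d.insert x (PySem.Int.bor (d.getD x 0) 1)) from rfl]
      exact PySem.Dict.nodup_keys_foldl_insert l1 _ _ PySem.Dict.nodup_keys_empty)
  -- items
  have hitems : M.items = M.keys.map (fun k => (k, M.getD k 0)) :=
    PySem.Dict.items_eq_map_keys M hnodup 0
  have hitems2 : M.items = (S1 ++ S2.filter (fun y => !(PySem.Set.contains S1 y))).map
      (fun k => (k, if k ∈ l1 then (if k ∈ l2 then (3:Int) else 1) else (if k ∈ l2 then 2 else 0))) := by
    rw [hitems, hkeys]
    exact List.map_congr_left (fun k _ => by rw [gv k])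
  -- the bucketing fold
  have hfst : M.items.map Prod.fst = M.keys := rfl
  have hbucket := pvBucket_foldl M.items PySem.Set.empty PySem.Set.empty PySem.Set.empty
    (by rw [hfst]; exact hnodup)
    (by intro p _ h; exact absurd h (List.not_mem_nil))
    (by intro p _ h; exact absurd h (List.not_mem_nil))
    (by intro p _ h; exact absurd h (List.not_mem_nil))
  rw [hbucket]
  -- membership facts on the two blocks
  have hmemS1 : ∀ k ∈ S1, k ∈ l1 := fun k hk => by
    rw [hS1] at hk; exact (PySem.Set.mem_ofList l1 k).mp hk
  have hmemR : ∀ k ∈ S2.filter (fun y => !(PySem.Set.contains S1 y)), k ∈ l2 ∧ k ∉ l1 := by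
    intro k hk
    have h2 : k ∈ S2 := List.mem_of_mem_filter hk
    have h1 := List.of_mem_filter hk
    rw [hS2] at h2
    refine ⟨(PySem.Set.mem_ofList l2 k).mp h2, fun hx => ?_⟩
    rw [(PySem.Set.contains_iff S1 k).mpr (hS1 ▸ (PySem.Set.mem_ofList l1 k).mpr hx)] at h1
    simp at h1
  set R : List String := S2.filter (fun y => !(PySem.Set.contains S1 y)) with hR
  set v : String → Int := fun k => if k ∈ l1 then (if k ∈ l2 then (3:Int) else 1) else (if k ∈ l2 then 2 else 0) with hv
  have hkey : ∀ (p : Int → Bool),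
      ((M.items.filter (fun q => p q.2)).map Prod.fst) = (S1 ++ R).filter (fun k => p (v k)) := by
    intro p
    rw [hitems2]
    simp [List.filter_map, List.map_map, Function.comp_def]
    rw [hv]
  have hcommon : (S1 ++ R).filter (fun k => v k == 3) = PySem.Set.inter S1 S2 := by
    rw [List.filter_append]
    have e1 : S1.filter (fun k => v k == 3) = S1.filter (fun k => PySem.Set.contains S2 k) := by
      refine List.filter_congr (fun k hk => ?_)
      have h1 : k ∈ l1 := hmemS1 k hk
      by_cases h2 : k ∈ l2
      · simp [hv, h1, h2, hS2, PySem.Set.mem_ofList]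
      · simp [hv, h1, h2, hS2, PySem.Set.mem_ofList]
    have e2 : R.filter (fun k => v k == 3) = [] := by
      refine List.filter_eq_nil_iff.mpr (fun k hk => ?_)
      obtain ⟨h2, h1⟩ := hmemR k hk
      simp [hv, h1, h2]
    rw [e1, e2, List.append_nil]
    rfl
  have hfirst : (S1 ++ R).filter (fun k => v k == 1) = PySem.Set.diff S1 S2 := by
    rw [List.filter_append]
    have e1 : S1.filter (fun k => v k == 1) = S1.filter (fun k => !(PySem.Set.contains S2 k)) := by
      refine List.filter_congr (fun k hk => ?_)
      have h1 : k ∈ l1 := hmemS1 k hk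
      by_cases h2 : k ∈ l2
      · simp [hv, h1, h2, hS2, PySem.Set.mem_ofList]
      · simp [hv, h1, h2, hS2, PySem.Set.mem_ofList]
    have e2 : R.filter (fun k => v k == 1) = [] := by
      refine List.filter_eq_nil_iff.mpr (fun k hk => ?_)
      obtain ⟨h2, h1⟩ := hmemR k hk
      simp [hv, h1, h2]
    rw [e1, e2, List.append_nil]
    rfl
  have hsecond : (S1 ++ R).filter (fun k => v k != 3 && v k != 1) = PySem.Set.diff S2 S1 := by
    rw [List.filter_append]
    have e1 : S1.filter (fun k => v k != 3 && v k != 1) = [] := by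
      refine List.filter_eq_nil_iff.mpr (fun k hk => ?_)
      have h1 : k ∈ l1 := hmemS1 k hk
      by_cases h2 : k ∈ l2 <;> simp [hv, h1, h2]
    have e2 : R.filter (fun k => v k != 3 && v k != 1) = R := by
      refine List.filter_eq_self.mpr (fun k hk => ?_)
      obtain ⟨h2, h1⟩ := hmemR k hk
      simp [hv, h1, h2]
    rw [e1, e2, List.nil_append, hR]
    rfl
  rw [hkey (fun x => x == 3), hkey (fun x => x == 1), hkey (fun x => x != 3 && x != 1),
    hcommon, hfirst, hsecond]
  simp

-- ===== VERDICT (by name: the statement is the Claim_ definition above) =====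
theorem find_unique_words_spec : Claim_equal_find_unique_words := by
  intro text1 text2 _
  unfold Spec_find_unique_words
  rw [pvA_eq, pvB_eq]
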